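-- pv_equiv track=rewrite | github.com/bakal3110/Python-Courses-and-Projects | PascalTri.py | find_frequent_binomials_fast
-- ===== SOURCE A (Python) =====
-- from collections import Counter
--
-- def find_frequent_binomials_fast(min_n=10, max_n=250, threshold=3):
--     freq = Counter()
--
--     for n in range(min_n, max_n + 1):
--         # Start with C(n, 2)
--         current = n * (n - 1) // 2
--         freq[current] += 1
--
--         # Compute up to C(n, n-2) using recurrence
--         for k in range(2, n - 2):
--             current = current * (n - k) // (k + 1)
--             freq[current] += 1
--
--     # Single pass to collect and sort frequent values
--     result = []
--     for val, count in freq.items():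
--         if count > threshold:
--             result.append(val)
--
--     result.sort()
--     return result
-- ===== SOURCE B (Python) =====
-- from collections import Counter
--
-- def find_frequent_binomials_fast(min_n=10, max_n=250, threshold=3):
--     freq = Counter()
--     row = [1]   # Pascal row for rn
--     rn = 0
--     for n in range(min_n, max_n + 1):
--         freq[n * (n - 1) // 2] += 1
--         while rn < n:
--             row = [1] + [row[i] + row[i + 1] for i in range(rn)] + [1]
--             rn += 1
--         for j in range(3, n - 1):
--             freq[row[j]] += 1
--     return sorted(v for v, c in freq.items() if c > threshold)
-- ===== Notes on version B (the rewrite author's own statement) =====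
-- stated objective: alternative
-- what changed: B maintains one Pascal row additively across all outer iterations (row[i]+row[i+1]) and reads the interior coefficients by index, instead of A's rebuilding each row's coefficients with the per-row multiplicative recurrence current = current*(n-k)//(k+1); collection uses a filtered comprehension instead of an append loop.
import Mathlib
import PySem

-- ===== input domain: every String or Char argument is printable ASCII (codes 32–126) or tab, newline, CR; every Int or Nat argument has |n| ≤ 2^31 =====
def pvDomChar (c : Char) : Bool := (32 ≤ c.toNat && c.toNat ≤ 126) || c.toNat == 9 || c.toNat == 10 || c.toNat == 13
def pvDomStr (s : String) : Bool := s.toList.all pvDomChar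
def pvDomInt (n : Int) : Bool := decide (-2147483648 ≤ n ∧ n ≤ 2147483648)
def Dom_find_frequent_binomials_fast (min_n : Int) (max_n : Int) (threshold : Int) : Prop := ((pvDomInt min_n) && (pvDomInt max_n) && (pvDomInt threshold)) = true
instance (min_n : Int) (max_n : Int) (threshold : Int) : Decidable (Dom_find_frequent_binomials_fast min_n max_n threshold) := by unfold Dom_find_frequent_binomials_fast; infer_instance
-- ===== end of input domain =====

-- B replaces A's per-row multiplicative recurrence by a Pascal row maintained additively
-- across outer iterations and read by index (objective: alternative).

-- ===== PORT A =====
def find_frequent_binomials_fast (min_n : Int) (max_n : Int) (threshold : Int) : List Int :=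
  let freq : PySem.Dict Int Int :=
    (PySem.List.pyRange min_n (max_n + 1) 1).foldl (fun freq n =>
      let current := PySem.Int.floordiv (n * (n - 1)) 2
      let freq := freq.modify current 0 (· + 1)
      let st := (PySem.List.pyRange 2 (n - 2) 1).foldl
          (fun (st : Int × PySem.Dict Int Int) k =>
            let current := PySem.Int.floordiv (st.1 * (n - k)) (k + 1)
            (current, st.2.modify current 0 (· + 1))) (current, freq)
      st.2) PySem.Dict.empty
  let result := freq.items.foldl (fun r vc => if vc.2 > threshold then r ++ [vc.1] else r) ([] : List Int)
  PySem.List.sorted result (fun x => x) false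

-- ===== PORT B =====
-- row = [1] + [row[i] + row[i + 1] for i in range(rn)] + [1]   (indices always in range)
def pvNextRow (row : List Int) (rn : Int) : List Int :=
  1 :: ((PySem.List.pyRange 0 rn 1).map
          (fun i => PySem.List.pyGetD row i 0 + PySem.List.pyGetD row (i + 1) 0) ++ [1])

-- the 'while rn < n' loop, run for its exact trip count (n - rn).toNat (rn rises by 1 each pass)
def pvAdvance (row : List Int) (rn : Int) : Nat → List Int × Int
  | 0 => (row, rn)
  | s + 1 => pvAdvance (pvNextRow row rn) (rn + 1) s

def find_frequent_binomials_fast_alt (min_n : Int) (max_n : Int) (threshold : Int) : List Int :=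
  let st := (PySem.List.pyRange min_n (max_n + 1) 1).foldl
    (fun (st : PySem.Dict Int Int × List Int × Int) n =>
      let freq := st.1.modify (PySem.Int.floordiv (n * (n - 1)) 2) 0 (· + 1)
      let rr := pvAdvance st.2.1 st.2.2 (n - st.2.2).toNat
      let freq := (PySem.List.pyRange 3 (n - 1) 1).foldl
          (fun f j => f.modify (PySem.List.pyGetD rr.1 j 0) 0 (· + 1)) freq
      (freq, rr.1, rr.2)) (PySem.Dict.empty, [1], 0)
  PySem.List.sorted ((st.1.items.filter (fun vc => vc.2 > threshold)).map (·.1)) (fun x => x) false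

-- ===== PRECONDITION & SPEC =====
def Spec_find_frequent_binomials_fast (min_n : Int) (max_n : Int) (threshold : Int) (out : List Int) : Prop := out = find_frequent_binomials_fast_alt min_n max_n threshold
instance (min_n : Int) (max_n : Int) (threshold : Int) (out : List Int) : Decidable (Spec_find_frequent_binomials_fast min_n max_n threshold out) := by unfold Spec_find_frequent_binomials_fast; infer_instance

-- ===== CLAIM (what is proved, stated in full; the proofs are below) =====
def Claim_equal_find_frequent_binomials_fast : Prop := ∀ (min_n : Int) (max_n : Int) (threshold : Int), Dom_find_frequent_binomials_fast min_n max_n threshold → Spec_find_frequent_binomials_fast min_n max_n threshold (find_frequent_binomials_fast min_n max_n threshold)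

-- ===== LEMMAS AND PROOFS =====

-- Pascal's row m, i.e. the binomial coefficients C(m, 0) … C(m, m)
def pvPascal (m : Nat) : List Int := (List.range (m + 1)).map (fun j => (Nat.choose m j : Int))

lemma pvNextRow_pascal (m : Nat) : pvNextRow (pvPascal m) (m : Int) = pvPascal (m + 1) := by
  unfold pvNextRow pvPascal
  rw [PySem.List.pyRange_zero_nat, List.map_map]
  have hmap : (List.range m).map ((fun i => PySem.List.pyGetD ((List.range (m+1)).map (fun j => (Nat.choose m j : Int))) i 0 + PySem.List.pyGetD ((List.range (m+1)).map (fun j => (Nat.choose m j : Int))) (i + 1) 0) ∘ (fun k : Nat => (k : Int)))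
      = (List.range m).map (fun i => (Nat.choose (m+1) (i+1) : Int)) := by
    apply List.map_congr_left
    intro i hi
    have hi' : i < m := List.mem_range.mp hi
    have h1 : ((i : Int) + 1) = ((i + 1 : Nat) : Int) := by push_cast; ring
    simp only [Function.comp, h1, PySem.List.pyGetD_natCast]
    rw [PySem.List.getD_map_range _ _ _ _ (by omega), PySem.List.getD_map_range _ _ _ _ (by omega)]
    rw [Nat.choose_succ_succ']
    push_cast; ring
  rw [hmap]
  have : List.range (m + 1 + 1) = 0 :: (List.range (m+1)).map Nat.succ := List.range_succ_eq_map
  rw [this, List.map_cons, List.map_map, List.range_succ, List.map_append]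
  simp [Nat.choose_succ_succ']

lemma pvAdvance_pascal (s m : Nat) :
    pvAdvance (pvPascal m) (m : Int) s = (pvPascal (m + s), ((m + s : Nat) : Int)) := by
  induction s generalizing m with
  | zero => simp [pvAdvance]
  | succ s ih =>
    show pvAdvance (pvNextRow (pvPascal m) (m : Int)) ((m : Int) + 1) s = _
    have h1 : ((m : Int) + 1) = ((m + 1 : Nat) : Int) := by push_cast; ring
    rw [pvNextRow_pascal, h1, ih (m + 1)]
    have h2 : m + 1 + s = m + (s + 1) := by omega
    rw [h2]

-- B's read loop over the Pascal row is a bump-fold over the coefficient values themselves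
lemma pvInnerB (N : Nat) (freq : PySem.Dict Int Int) :
    (PySem.List.pyRange 3 ((N : Int) - 1) 1).foldl
        (fun f j => f.modify (PySem.List.pyGetD (pvPascal N) j 0) 0 (· + 1)) freq
    = ((PySem.List.pyRange 3 ((N : Int) - 1) 1).map
        (fun j => (Nat.choose N j.toNat : Int))).foldl (fun f v => f.modify v 0 (· + 1)) freq := by
  rw [List.foldl_map]
  apply PySem.List.foldl_congr_mem
  intro f j hj
  have hj' := PySem.List.mem_pyRange_one.mp hj
  have h0 : j = ((j.toNat : Nat) : Int) := by omega
  rw [h0, PySem.List.pyGetD_natCast]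
  unfold pvPascal
  rw [PySem.List.getD_map_range _ _ _ _ (by omega), Int.toNat_natCast]

-- A's multiplicative inner loop bumps exactly the same coefficient values
lemma pvInnerA_aux (N : Nat) (d : Nat) : ∀ (k : Nat) (freq : PySem.Dict Int Int), 2 ≤ k → N ≤ k + 2 + d →
    ((PySem.List.pyRange (k : Int) ((N : Int) - 2) 1).foldl
        (fun (st : Int × PySem.Dict Int Int) kk =>
          ((PySem.Int.floordiv (st.1 * (((N : Int)) - kk)) (kk + 1)),
            st.2.modify (PySem.Int.floordiv (st.1 * (((N : Int)) - kk)) (kk + 1)) 0 (· + 1)))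
        ((Nat.choose N k : Int), freq)).2
    = ((PySem.List.pyRange ((k : Int) + 1) ((N : Int) - 1) 1).map
        (fun j => (Nat.choose N j.toNat : Int))).foldl (fun f v => f.modify v 0 (· + 1)) freq := by
  induction d with
  | zero =>
    intro k freq hk hN
    rw [PySem.List.pyRange_one_eq_nil (by omega), PySem.List.pyRange_one_eq_nil (by omega)]
    rfl
  | succ d ih =>
    intro k freq hk hN
    by_cases hbig : (N : Int) - 2 ≤ (k : Int)
    · rw [PySem.List.pyRange_one_eq_nil hbig, PySem.List.pyRange_one_eq_nil (by omega)]
      rfl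
    · have hkN : k + 3 ≤ N := by omega
      have hc1 : PySem.List.pyRange (k : Int) ((N : Int) - 2) = (k : Int) :: PySem.List.pyRange ((k : Int) + 1) ((N : Int) - 2) := PySem.List.pyRange_one_cons (by omega)
      have hc2 : PySem.List.pyRange ((k : Int) + 1) ((N : Int) - 1) = ((k : Int) + 1) :: PySem.List.pyRange ((k : Int) + 1 + 1) ((N : Int) - 1) := PySem.List.pyRange_one_cons (by omega)
      rw [hc1, hc2]
      simp only [List.foldl_cons, List.map_cons]
      have hsub : (N : Int) - (k : Int) = ((N - k : Nat) : Int) := by omega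
      have hk1 : (k : Int) + 1 = ((k + 1 : Nat) : Int) := by push_cast; ring
      have hcur : PySem.Int.floordiv ((Nat.choose N k : Int) * ((N : Int) - (k : Int))) ((k : Int) + 1)
          = (Nat.choose N (k + 1) : Int) := by
        rw [hsub, hk1]
        rw [show ((Nat.choose N k : Int) * ((N - k : Nat) : Int)) = ((Nat.choose N k * (N - k) : Nat) : Int) by push_cast; ring]
        rw [PySem.Int.floordiv_natCast]
        rw [← Nat.choose_succ_right_eq, Nat.mul_div_cancel _ (by omega)]
      rw [hcur]
      have htn : ((k : Int) + 1).toNat = k + 1 := by omega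
      rw [htn, hk1]
      exact ih (k + 1) (freq.modify ((Nat.choose N (k + 1) : Int)) 0 (· + 1)) (by omega) (by omega)

-- one outer iteration at n = a produces the same Counter on both sides
lemma pvStepFreq (a : Int) (m' : Nat) (hm5 : 5 ≤ a → (m' : Int) = a) (freq : PySem.Dict Int Int) :
    ((PySem.List.pyRange 2 (a - 2) 1).foldl
        (fun (st : Int × PySem.Dict Int Int) k =>
          (PySem.Int.floordiv (st.1 * (a - k)) (k + 1),
           st.2.modify (PySem.Int.floordiv (st.1 * (a - k)) (k + 1)) 0 (· + 1)))
        (PySem.Int.floordiv (a * (a - 1)) 2,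
         freq.modify (PySem.Int.floordiv (a * (a - 1)) 2) 0 (· + 1))).2
    = (PySem.List.pyRange 3 (a - 1) 1).foldl
        (fun f j => f.modify (PySem.List.pyGetD (pvPascal m') j 0) 0 (· + 1))
        (freq.modify (PySem.Int.floordiv (a * (a - 1)) 2) 0 (· + 1)) := by
  by_cases h5 : 5 ≤ a
  · obtain ⟨N, rfl⟩ : ∃ N : Nat, a = (N : Int) := ⟨a.toNat, by omega⟩
    have hmN : m' = N := by have := hm5 h5; exact_mod_cast this
    rw [hmN]
    have hN1 : ((N : Int) * ((N : Int) - 1)) = ((N * (N - 1) : Nat) : Int) := by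
      have h1 : (1 : Nat) ≤ N := by exact_mod_cast (by omega : (1:Int) ≤ (N:Int))
      push_cast [h1]; ring
    have hcur : PySem.Int.floordiv ((N : Int) * ((N : Int) - 1)) 2 = (Nat.choose N 2 : Int) := by
      rw [hN1, show (2 : Int) = ((2 : Nat) : Int) from rfl, PySem.Int.floordiv_natCast,
        Nat.choose_two_right]
    rw [hcur]
    have hA := pvInnerA_aux N N 2
      (freq.modify ((Nat.choose N 2 : Int)) 0 (· + 1)) (by omega) (by omega)
    have hB := pvInnerB N (freq.modify ((Nat.choose N 2 : Int)) 0 (· + 1))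
    norm_num at hA
    rw [hB, ← hA]
  · rw [PySem.List.pyRange_one_eq_nil (by omega), PySem.List.pyRange_one_eq_nil (by omega)]
    rfl

-- the whole outer loop: A's Counter equals the Counter component of B's state
lemma pvOuter_aux (b : Int) (d : Nat) : ∀ (a : Int), (b - a).toNat = d →
    ∀ (freq : PySem.Dict Int Int) (m : Nat), (m : Int) ≤ max a 0 →
    (PySem.List.pyRange a b 1).foldl (fun freq n =>
      let current := PySem.Int.floordiv (n * (n - 1)) 2
      let freq := freq.modify current 0 (· + 1)
      let st := (PySem.List.pyRange 2 (n - 2) 1).foldl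
          (fun (st : Int × PySem.Dict Int Int) k =>
            let current := PySem.Int.floordiv (st.1 * (n - k)) (k + 1)
            (current, st.2.modify current 0 (· + 1))) (current, freq)
      st.2) freq
    = ((PySem.List.pyRange a b 1).foldl (fun (st : PySem.Dict Int Int × List Int × Int) n =>
        let freq := st.1.modify (PySem.Int.floordiv (n * (n - 1)) 2) 0 (· + 1)
        let rr := pvAdvance st.2.1 st.2.2 (n - st.2.2).toNat
        let freq := (PySem.List.pyRange 3 (n - 1) 1).foldl
            (fun f j => f.modify (PySem.List.pyGetD rr.1 j 0) 0 (· + 1)) freq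
        (freq, rr.1, rr.2)) (freq, pvPascal m, (m : Int))).1 := by
  induction d with
  | zero =>
    intro a ha freq m hm
    rw [PySem.List.pyRange_one_eq_nil (by omega)]
    rfl
  | succ d ih =>
    intro a ha freq m hm
    rw [PySem.List.pyRange_one_cons (by omega)]
    simp only [List.foldl_cons]
    have hadv := pvAdvance_pascal (a - (m : Int)).toNat m
    set m' : Nat := m + (a - (m : Int)).toNat with hm'
    have hm5 : 5 ≤ a → (m' : Int) = a := by
      intro h; simp only [hm']; push_cast; omega
    have hm'inv : (m' : Int) ≤ max (a + 1) 0 := by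
      simp only [hm']; push_cast; omega
    simp only [hadv]
    rw [← pvStepFreq a m' hm5 freq]
    exact ih (a + 1) (by omega) _ m' hm'inv

-- ===== VERDICT (by name: the statement is the Claim_ definition above) =====
theorem find_frequent_binomials_fast_spec : Claim_equal_find_frequent_binomials_fast := by
  intro min_n max_n threshold _
  unfold Spec_find_frequent_binomials_fast
  unfold find_frequent_binomials_fast find_frequent_binomials_fast_alt
  have hout := pvOuter_aux (max_n + 1) ((max_n + 1) - min_n).toNat min_n rfl
    PySem.Dict.empty 0 (by simp)
  have hinit : pvPascal 0 = [1] := rfl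
  rw [hinit] at hout
  dsimp only
  dsimp only at hout
  simp only [Nat.cast_zero] at hout
  rw [← hout]
  have hfe : (fun (r : List Int) (vc : Int × Int) => if vc.2 > threshold then r ++ [vc.1] else r)
      = (fun r vc => if (fun vc : Int × Int => decide (vc.2 > threshold)) vc = true
          then r ++ [(fun vc : Int × Int => vc.1) vc] else r) := by
    funext r vc
    by_cases h : vc.2 > threshold <;> simp [h]
  rw [hfe, PySem.List.foldl_append_if]
  simp
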